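-- pv_equiv track=rewrite | github.com/Ashwot-Acharya/Sudoku_SAT | Main/puzzle_fetcher.py | _gen36_clues
-- ===== SOURCE A (Python) =====
-- def _gen36_clues(offset=0):
--     clues = []
--     box = 6
--     for br in range(6):
--         for bc in range(6):
--             idx = br * 6 + bc
--             r = br * box + (idx % box)
--             c = bc * box + ((idx + offset) % box)
--             v = ((idx + offset) % 36) + 1
--             clues.append((r, c, v))
--         for bc in range(6):
--             idx = br * 6 + bc
--             r = br * box + ((idx + 3) % box)
--             c = bc * box + ((idx + offset + 2) % box)
--             v = ((idx + offset + 18) % 36) + 1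
--             row_v = {vv for rr,cc,vv in clues if rr == r}
--             col_v = {vv for rr,cc,vv in clues if cc == c}
--             box_v = {vv for rr,cc,vv in clues if (rr//box)==br and (cc//box)==bc}
--             if v not in row_v and v not in col_v and v not in box_v:
--                 clues.append((r, c, v))
--     return clues
-- ===== SOURCE B (Python) =====
-- def _gen36_clues(offset=0):
--     clues = []
--     box = 6
--     by_row, by_col, by_box = {}, {}, {}
--
--     def add(r, c, v):
--         clues.append((r, c, v))
--         by_row.setdefault(r, set()).add(v)
--         by_col.setdefault(c, set()).add(v)
--         by_box.setdefault((r // box, c // box), set()).add(v)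
--
--     for br in range(6):
--         for bc in range(6):
--             idx = br * 6 + bc
--             add(br * box + idx % box,
--                 bc * box + (idx + offset) % box,
--                 (idx + offset) % 36 + 1)
--         for bc in range(6):
--             idx = br * 6 + bc
--             r = br * box + (idx + 3) % box
--             c = bc * box + (idx + offset + 2) % box
--             v = (idx + offset + 18) % 36 + 1
--             if (v not in by_row.get(r, ())
--                     and v not in by_col.get(c, ())
--                     and v not in by_box.get((br, bc), ())):
--                 add(r, c, v)
--     return clues
-- ===== Notes on version B (the rewrite author's own statement) =====
-- stated objective: alternative
-- what changed: B maintains three incrementally updated indexes (values seen per row, per column, per box) and tests each candidate with direct set lookups, instead of A's rebuilding three full set comprehensions over the whole clues list for every candidate.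
import Mathlib
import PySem

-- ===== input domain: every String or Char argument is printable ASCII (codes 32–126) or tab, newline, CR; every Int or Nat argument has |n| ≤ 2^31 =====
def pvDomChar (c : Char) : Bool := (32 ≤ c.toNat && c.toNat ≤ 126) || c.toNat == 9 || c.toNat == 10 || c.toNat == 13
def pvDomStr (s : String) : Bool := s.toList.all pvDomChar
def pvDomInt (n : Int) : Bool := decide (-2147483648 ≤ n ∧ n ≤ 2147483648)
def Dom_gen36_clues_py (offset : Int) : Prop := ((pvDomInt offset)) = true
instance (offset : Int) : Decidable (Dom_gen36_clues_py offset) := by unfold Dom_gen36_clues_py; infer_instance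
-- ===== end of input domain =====

-- B replaces A's per-candidate full rescans of `clues` (three set comprehensions per candidate)
-- with three incrementally maintained indexes (by row, by column, by box); objective: alternative.

-- ===== PORT A =====
-- first inner loop of A: unconditional appends
def pvA_first (offset br : Int) (clues : List (Int × Int × Int)) : List (Int × Int × Int) :=
  (PySem.List.pyRange 0 6 1).foldl (fun clues bc =>
    let idx := br * 6 + bc
    let r := br * 6 + PySem.Int.mod idx 6
    let c := bc * 6 + PySem.Int.mod (idx + offset) 6
    let v := PySem.Int.mod (idx + offset) 36 + 1
    clues ++ [(r, c, v)]) clues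

-- second inner loop of A: guarded appends, sets rebuilt from `clues` each step
def pvA_second (offset br : Int) (clues : List (Int × Int × Int)) : List (Int × Int × Int) :=
  (PySem.List.pyRange 0 6 1).foldl (fun clues bc =>
    let idx := br * 6 + bc
    let r := br * 6 + PySem.Int.mod (idx + 3) 6
    let c := bc * 6 + PySem.Int.mod (idx + offset + 2) 6
    let v := PySem.Int.mod (idx + offset + 18) 36 + 1
    let row_v : PySem.Set Int :=
      PySem.Set.ofList ((clues.filter (fun t => t.1 == r)).map (fun t => t.2.2))
    let col_v : PySem.Set Int :=
      PySem.Set.ofList ((clues.filter (fun t => t.2.1 == c)).map (fun t => t.2.2))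
    let box_v : PySem.Set Int :=
      PySem.Set.ofList ((clues.filter (fun t =>
        PySem.Int.floordiv t.1 6 == br && PySem.Int.floordiv t.2.1 6 == bc)).map (fun t => t.2.2))
    if !(PySem.Set.contains row_v v) && !(PySem.Set.contains col_v v) && !(PySem.Set.contains box_v v) then
      clues ++ [(r, c, v)]
    else clues) clues

def gen36_clues_py (offset : Int) : List (Int × Int × Int) :=
  (PySem.List.pyRange 0 6 1).foldl (fun clues br =>
    pvA_second offset br (pvA_first offset br clues)) []

-- ===== PORT B =====
-- B's state: clues plus three indexes (by row, by column, by box)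
abbrev pvBSt := List (Int × Int × Int) × PySem.Dict Int (PySem.Set Int) ×
  PySem.Dict Int (PySem.Set Int) × PySem.Dict (Int × Int) (PySem.Set Int)

-- add(r, c, v): append and register in the three indexes (setdefault(..).add(v) = Dict.modify)
def pvB_add (st : pvBSt) (r c v : Int) : pvBSt :=
  let (clues, byRow, byCol, byBox) := st
  (clues ++ [(r, c, v)],
   byRow.modify r PySem.Set.empty (fun s => PySem.Set.add s v),
   byCol.modify c PySem.Set.empty (fun s => PySem.Set.add s v),
   byBox.modify (PySem.Int.floordiv r 6, PySem.Int.floordiv c 6) PySem.Set.empty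
     (fun s => PySem.Set.add s v))

def pvB_first (offset br : Int) (st : pvBSt) : pvBSt :=
  (PySem.List.pyRange 0 6 1).foldl (fun st bc =>
    let idx := br * 6 + bc
    pvB_add st (br * 6 + PySem.Int.mod idx 6) (bc * 6 + PySem.Int.mod (idx + offset) 6)
      (PySem.Int.mod (idx + offset) 36 + 1)) st

def pvB_second (offset br : Int) (st : pvBSt) : pvBSt :=
  (PySem.List.pyRange 0 6 1).foldl (fun st bc =>
    let idx := br * 6 + bc
    let r := br * 6 + PySem.Int.mod (idx + 3) 6
    let c := bc * 6 + PySem.Int.mod (idx + offset + 2) 6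
    let v := PySem.Int.mod (idx + offset + 18) 36 + 1
    if !(PySem.Set.contains (st.2.1.getD r PySem.Set.empty) v) &&
       !(PySem.Set.contains (st.2.2.1.getD c PySem.Set.empty) v) &&
       !(PySem.Set.contains (st.2.2.2.getD (br, bc) PySem.Set.empty) v) then
      pvB_add st r c v
    else st) st

def gen36_clues_py_alt (offset : Int) : List (Int × Int × Int) :=
  ((PySem.List.pyRange 0 6 1).foldl (fun st br =>
    pvB_second offset br (pvB_first offset br st))
    ([], PySem.Dict.empty, PySem.Dict.empty, PySem.Dict.empty)).1

-- ===== PRECONDITION & SPEC =====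
def Spec_gen36_clues_py (offset : Int) (out : List (Int × Int × Int)) : Prop := out = gen36_clues_py_alt offset
instance (offset : Int) (out : List (Int × Int × Int)) : Decidable (Spec_gen36_clues_py offset out) := by unfold Spec_gen36_clues_py; infer_instance

-- ===== CLAIM (what is proved, stated in full; the proofs are below) =====
def Claim_equal_gen36_clues_py : Prop := ∀ (offset : Int), Dom_gen36_clues_py offset → Spec_gen36_clues_py offset (gen36_clues_py offset)

-- ===== LEMMAS AND PROOFS =====

-- fold two loops in lockstep under a relation between their states
theorem pvFoldRel {α β γ : Type} (R : α → β → Prop) (f : α → γ → α) (g : β → γ → β) (l : List γ)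
    (h : ∀ a b x, x ∈ l → R a b → R (f a x) (g b x)) :
    ∀ a b, R a b → R (l.foldl f a) (l.foldl g b) := by
  induction l with
  | nil => intro a b hab; exact hab
  | cons x xs ih =>
    intro a b hab
    exact ih (fun a b y hy => h a b y (List.mem_cons_of_mem _ hy)) _ _
      (h a b x (List.mem_cons_self) hab)

theorem pvContains_congr (s t : PySem.Set Int) (v : Int) (h : v ∈ s ↔ v ∈ t) :
    PySem.Set.contains s v = PySem.Set.contains t v := by
  rw [Bool.eq_iff_iff, PySem.Set.contains_iff, PySem.Set.contains_iff]; exact h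

-- the invariant: B's three indexes contain exactly what A's three comprehensions collect
def pvInv (st : pvBSt) : Prop :=
  (∀ r v : Int, v ∈ PySem.Dict.getD st.2.1 r PySem.Set.empty ↔
      v ∈ (st.1.filter (fun t => t.1 == r)).map (fun t => t.2.2)) ∧
  (∀ c v : Int, v ∈ PySem.Dict.getD st.2.2.1 c PySem.Set.empty ↔
      v ∈ (st.1.filter (fun t => t.2.1 == c)).map (fun t => t.2.2)) ∧
  (∀ p q v : Int, v ∈ PySem.Dict.getD st.2.2.2 (p, q) PySem.Set.empty ↔
      v ∈ (st.1.filter (fun t =>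
        PySem.Int.floordiv t.1 6 == p && PySem.Int.floordiv t.2.1 6 == q)).map (fun t => t.2.2))

def pvR (clues : List (Int × Int × Int)) (st : pvBSt) : Prop := st.1 = clues ∧ pvInv st

theorem pvB_add_fst (st : pvBSt) (r c v : Int) : (pvB_add st r c v).1 = st.1 ++ [(r, c, v)] := by
  obtain ⟨cl, dr, dc, db⟩ := st; rfl

theorem pvB_add_inv (st : pvBSt) (r c v : Int) (h : pvInv st) : pvInv (pvB_add st r c v) := by
  obtain ⟨cl, dr, dc, db⟩ := st
  obtain ⟨h1, h2, h3⟩ := h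
  dsimp only at h1 h2 h3
  simp only [PySem.Set.empty] at h1 h2 h3
  simp only [pvB_add, pvInv]
  refine ⟨?_, ?_, ?_⟩
  · intro r' v'
    rw [PySem.Dict.getD_modify]
    by_cases hrr : r' = r
    · subst hrr
      simp [PySem.Set.mem_add, List.filter_append, h1 r' v']
    · have hb : (r == r') = false := by simp [Ne.symm hrr]
      simp [hrr, List.filter_append, hb, h1 r' v']
  · intro c' v'
    rw [PySem.Dict.getD_modify]
    by_cases hcc : c' = c
    · subst hcc
      simp [PySem.Set.mem_add, List.filter_append, h2 c' v']
    · have hb : (c == c') = false := by simp [Ne.symm hcc]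
      simp [hcc, List.filter_append, hb, h2 c' v']
  · intro p q v'
    rw [PySem.Dict.getD_modify]
    by_cases hpq : (p, q) = (PySem.Int.floordiv r 6, PySem.Int.floordiv c 6)
    · rw [Prod.mk.injEq] at hpq
      obtain ⟨hp, hq⟩ := hpq
      subst hp; subst hq
      simp [PySem.Set.mem_add, List.filter_append, h3 _ _ v']
    · have hr6 : PySem.Int.floordiv r 6 = r / 6 := PySem.Int.floordiv_eq_ediv_of_pos (by norm_num)
      have hc6 : PySem.Int.floordiv c 6 = c / 6 := PySem.Int.floordiv_eq_ediv_of_pos (by norm_num)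
      have hna : ¬ (r / 6 = p ∧ c / 6 = q) := by
        rw [Prod.mk.injEq, Decidable.not_and_iff_or_not] at hpq
        rcases hpq with h | h
        · exact fun hh => h (by rw [hr6]; exact hh.1.symm)
        · exact fun hh => h (by rw [hc6]; exact hh.2.symm)
      rw [if_neg hpq]
      simp [List.filter_append, h3 p q v']
      exact fun _ hp hq => absurd ⟨hp, hq⟩ hna

theorem pvStep1_rel (offset br : Int) (clues : List (Int × Int × Int)) (st : pvBSt)
    (h : pvR clues st) : pvR (pvA_first offset br clues) (pvB_first offset br st) := by
  unfold pvA_first pvB_first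
  refine pvFoldRel pvR _ _ _ ?_ clues st h
  intro a b bc _ hab
  obtain ⟨hfst, hinv⟩ := hab
  constructor
  · rw [pvB_add_fst, hfst]
  · exact pvB_add_inv _ _ _ _ hinv

theorem pvStep2_rel (offset br : Int) (clues : List (Int × Int × Int)) (st : pvBSt)
    (h : pvR clues st) : pvR (pvA_second offset br clues) (pvB_second offset br st) := by
  unfold pvA_second pvB_second
  refine pvFoldRel pvR _ _ _ ?_ clues st h
  intro a b bc _ hab
  obtain ⟨hfst, h1, h2, h3⟩ := hab
  subst hfst
  dsimp only
  have hrow : PySem.Set.contains (PySem.Set.ofList ((b.1.filter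
        (fun t => t.1 == br * 6 + PySem.Int.mod (br * 6 + bc + 3) 6)).map (fun t => t.2.2)))
        (PySem.Int.mod (br * 6 + bc + offset + 18) 36 + 1)
      = PySem.Set.contains (PySem.Dict.getD b.2.1 (br * 6 + PySem.Int.mod (br * 6 + bc + 3) 6)
        PySem.Set.empty) (PySem.Int.mod (br * 6 + bc + offset + 18) 36 + 1) := by
    apply pvContains_congr
    rw [PySem.Set.mem_ofList]
    exact (h1 _ _).symm
  have hcol : PySem.Set.contains (PySem.Set.ofList ((b.1.filter
        (fun t => t.2.1 == bc * 6 + PySem.Int.mod (br * 6 + bc + offset + 2) 6)).map (fun t => t.2.2)))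
        (PySem.Int.mod (br * 6 + bc + offset + 18) 36 + 1)
      = PySem.Set.contains (PySem.Dict.getD b.2.2.1 (bc * 6 + PySem.Int.mod (br * 6 + bc + offset + 2) 6)
        PySem.Set.empty) (PySem.Int.mod (br * 6 + bc + offset + 18) 36 + 1) := by
    apply pvContains_congr
    rw [PySem.Set.mem_ofList]
    exact (h2 _ _).symm
  have hbox : PySem.Set.contains (PySem.Set.ofList ((b.1.filter
        (fun t => PySem.Int.floordiv t.1 6 == br && PySem.Int.floordiv t.2.1 6 == bc)).map (fun t => t.2.2)))
        (PySem.Int.mod (br * 6 + bc + offset + 18) 36 + 1)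
      = PySem.Set.contains (PySem.Dict.getD b.2.2.2 (br, bc) PySem.Set.empty)
        (PySem.Int.mod (br * 6 + bc + offset + 18) 36 + 1) := by
    apply pvContains_congr
    rw [PySem.Set.mem_ofList]
    exact (h3 _ _ _).symm
  rw [hrow, hcol, hbox]
  split_ifs with hg
  · exact ⟨pvB_add_fst .., pvB_add_inv _ _ _ _ ⟨h1, h2, h3⟩⟩
  · exact ⟨rfl, h1, h2, h3⟩

theorem pvInit : pvR ([] : List (Int × Int × Int))
    (([], PySem.Dict.empty, PySem.Dict.empty, PySem.Dict.empty) : pvBSt) := by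
  refine ⟨rfl, ?_, ?_, ?_⟩
  · intro _ _; simp [PySem.Dict.getD_empty]
  · intro _ _; simp [PySem.Dict.getD_empty]
  · intro _ _ _; simp [PySem.Dict.getD_empty]

-- ===== VERDICT (by name: the statement is the Claim_ definition above) =====
theorem gen36_clues_py_spec : Claim_equal_gen36_clues_py := by
  intro offset _
  unfold Spec_gen36_clues_py gen36_clues_py gen36_clues_py_alt
  have := pvFoldRel pvR
    (fun clues br => pvA_second offset br (pvA_first offset br clues))
    (fun st br => pvB_second offset br (pvB_first offset br st))
    (PySem.List.pyRange 0 6 1)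
    (fun a b br _ hab => pvStep2_rel offset br _ _ (pvStep1_rel offset br _ _ hab))
    [] ([], PySem.Dict.empty, PySem.Dict.empty, PySem.Dict.empty) pvInit
  exact this.1.symm
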